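-- pv_equiv track=rewrite | github.com/rzg9574/NeworkingEquipmentScraper | Scrapers/arista_scraper.py | cutDescriptionBottom
-- ===== SOURCE A (Python) =====
-- def cutDescriptionBottom(string):
--     """
--     Checks the end of the description to see if it ends with text that is really the starting part of the previously found partnumber and if so
--     it deletes the found partnumber fragment from the decsription and returns that description and partnumber fragment
--
--     Args:
--         string (str): description text
--
--     Returns:
--         tuple: returns a tuple the frist index is the decription and the second index is the partnumber frangment
--     """
--     text = ""
--     for char in range(len(string) -1, -1, -1):
--         if string[char].islower():
--             break
--         else:
--             text += string[char]
--
--     if len(text) > 1: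
--         string = string[:-len(text)]
--         return text[::-1], string
--     return text, string
-- ===== SOURCE B (Python) =====
-- def cutDescriptionBottom(string):
--     last = -1
--     for i, ch in enumerate(string):
--         if ch.islower():
--             last = i
--     suffix = string[last + 1:]
--     if len(suffix) > 1:
--         return suffix, string[:last + 1]
--     return suffix, string
-- ===== Notes on version B (the rewrite author's own statement) =====
-- stated objective: alternative
-- what changed: B replaces A's backward character-by-character scan that accumulates (and later reverses) the suffix string by a single forward enumerate pass that only tracks the index of the last lowercase character and then takes two slices.
import Mathlib
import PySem

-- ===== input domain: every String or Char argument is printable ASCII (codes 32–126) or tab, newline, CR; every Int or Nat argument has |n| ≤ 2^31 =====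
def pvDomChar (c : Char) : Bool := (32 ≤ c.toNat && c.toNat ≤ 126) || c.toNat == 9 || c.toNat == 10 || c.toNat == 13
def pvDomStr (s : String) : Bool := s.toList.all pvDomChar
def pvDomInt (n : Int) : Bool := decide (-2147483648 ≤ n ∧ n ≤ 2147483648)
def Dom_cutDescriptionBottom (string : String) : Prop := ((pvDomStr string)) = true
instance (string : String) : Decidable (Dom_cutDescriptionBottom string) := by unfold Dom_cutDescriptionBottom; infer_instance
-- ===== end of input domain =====

-- B replaces A's backward scan-and-accumulate (plus a reversal of the accumulator) by a single
-- forward pass tracking the index of the last lowercase character, then slices; objective: alternative decomposition.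

-- ===== PORT A =====
-- A's loop 'for char in range(len(string)-1, -1, -1): …' with its break, as recursion on the
-- index; the fuel n means the current Python index is n-1 (indices n-1, n-2, …, 0).
def cutALoop (cs : List Char) : Nat → List Char → List Char
  | 0, text => text
  | n+1, text =>
    match PySem.List.pyGet? cs (n : Int) with
    | none => text   -- unreachable: 0 ≤ n < cs.length
    | some c => if PySem.Chars.islower c then text else cutALoop cs n (text ++ [c])

def cutDescriptionBottom (string : String) : String × String :=
  let cs := string.toList
  let text := cutALoop cs cs.length []
  if text.length > 1 then
    -- text[::-1] is text.reverse (PySem.List.slice?_none_none_neg_one); string[:-len(text)]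
    (String.ofList text.reverse, String.ofList (PySem.List.slice cs none (some (-(text.length : Int)))))
  else
    (String.ofList text, string)

-- ===== PORT B =====
-- forward pass over enumerate(string), tracking the index of the last lowercase character
def cutBLoop : List (Int × Char) → Int → Int
  | [], last => last
  | (i, c) :: rest, last => cutBLoop rest (if PySem.Chars.islower c then i else last)

def cutDescriptionBottom_alt (string : String) : String × String :=
  let cs := string.toList
  let last := cutBLoop (PySem.List.enumerate cs 0) (-1)
  let suffix := PySem.List.slice cs (some (last + 1)) none      -- string[last+1:]
  if suffix.length > 1 then
    (String.ofList suffix, String.ofList (PySem.List.slice cs none (some (last + 1))))  -- string[:last+1]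
  else
    (String.ofList suffix, string)

-- ===== PRECONDITION & SPEC =====
def Spec_cutDescriptionBottom (string : String) (out : String × String) : Prop := out = cutDescriptionBottom_alt string
instance (string : String) (out : String × String) : Decidable (Spec_cutDescriptionBottom string out) := by unfold Spec_cutDescriptionBottom; infer_instance

-- ===== CLAIM (what is proved, stated in full; the proofs are below) =====
def Claim_equal_cutDescriptionBottom : Prop := ∀ (string : String), Dom_cutDescriptionBottom string → Spec_cutDescriptionBottom string (cutDescriptionBottom string)

-- ===== LEMMAS AND PROOFS =====

-- A's loop collects, reversed, the trailing run of non-lowercase characters of the first n chars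
theorem cutALoop_eq (cs : List Char) :
    ∀ (n : Nat), n ≤ cs.length → ∀ (text : List Char),
      cutALoop cs n text = text ++ ((cs.take n).reverse.takeWhile (fun c => !PySem.Chars.islower c)) := by
  intro n
  induction n with
  | zero => intro _ text; simp [cutALoop]
  | succ n ih =>
    intro h text
    have hn : n < cs.length := by omega
    have hget : PySem.List.pyGet? cs (n : Int) = some cs[n] := by
      rw [PySem.List.pyGet?_natCast]
      simp [hn]
    have htake : (cs.take (n+1)).reverse = cs[n] :: (cs.take n).reverse := by
      rw [List.take_add_one]
      simp [hn]
    rw [cutALoop, hget]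
    by_cases hc : PySem.Chars.islower cs[n]
    · simp [hc, htake]
    · simp only [hc]
      rw [if_neg (by simp), ih (by omega), htake]
      simp [hc]

theorem cutBLoop_append (l : List (Int × Char)) (i : Int) (c : Char) (acc : Int) :
    cutBLoop (l ++ [(i, c)]) acc = if PySem.Chars.islower c then i else cutBLoop l acc := by
  induction l generalizing acc with
  | nil => simp [cutBLoop]
  | cons p rest ih => cases p; simp [cutBLoop, ih]

-- B's loop returns len - (trailing non-lowercase run).length - 1
theorem cutBLoop_eq (cs : List Char) :
    cutBLoop (PySem.List.enumerate cs 0) (-1)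
      = (cs.length : Int) - (cs.reverse.takeWhile (fun c => !PySem.Chars.islower c)).length - 1 := by
  induction cs using List.reverseRecOn with
  | nil => simp [PySem.List.enumerate, cutBLoop]
  | append_singleton ds c ih =>
    rw [PySem.List.enumerate_append]
    simp only [PySem.List.enumerate_cons, PySem.List.enumerate_nil, zero_add, List.reverse_append,
      List.reverse_cons, List.reverse_nil, List.nil_append, List.cons_append, List.length_append]
    rw [cutBLoop_append]
    by_cases hc : PySem.Chars.islower c
    · simp [hc, List.takeWhile]
    · rw [if_neg hc, ih]
      simp [List.takeWhile, hc]
      try omega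

theorem reverse_eq_self_of_length_le_one {α : Type} (l : List α) (h : l.length ≤ 1) :
    l.reverse = l := by
  match l, h with
  | [], _ => rfl
  | [a], _ => rfl

-- the two bodies agree, stated over the character list
theorem cut_main (string : String) (cs : List Char) :
    (if (cutALoop cs cs.length []).length > 1 then
       (String.ofList (cutALoop cs cs.length []).reverse,
        String.ofList (PySem.List.slice cs none (some (-((cutALoop cs cs.length []).length : Int)))))
     else (String.ofList (cutALoop cs cs.length []), string))
  = (if (PySem.List.slice cs (some (cutBLoop (PySem.List.enumerate cs 0) (-1) + 1)) none).length > 1 then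
       (String.ofList (PySem.List.slice cs (some (cutBLoop (PySem.List.enumerate cs 0) (-1) + 1)) none),
        String.ofList (PySem.List.slice cs none (some (cutBLoop (PySem.List.enumerate cs 0) (-1) + 1))))
     else (String.ofList (PySem.List.slice cs (some (cutBLoop (PySem.List.enumerate cs 0) (-1) + 1)) none), string)) := by
  have htdw := List.takeWhile_append_dropWhile (p := fun c => !PySem.Chars.islower c) (l := cs.reverse)
  have hA : cutALoop cs cs.length [] = cs.reverse.takeWhile (fun c => !PySem.Chars.islower c) := by
    rw [cutALoop_eq cs cs.length le_rfl [], List.take_length]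
    simp
  have hB := cutBLoop_eq cs
  set tl := cs.reverse.takeWhile (fun c => !PySem.Chars.islower c) with htl
  set rest := cs.reverse.dropWhile (fun c => !PySem.Chars.islower c) with hrest
  have hlen : tl.length + rest.length = cs.length := by
    have := congrArg List.length htdw
    simpa using this
  have hsplit : cs = rest.reverse ++ tl.reverse := by
    have h2 : cs.reverse.reverse = (tl ++ rest).reverse := by rw [htdw]
    simpa [List.reverse_append] using h2
  have hlastp1 : (cs.length : Int) - tl.length - 1 + 1 = ((rest.length : Nat) : Int) := by
    omega
  have hdrop : List.drop rest.length cs = tl.reverse := by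
    conv_lhs => rw [hsplit]
    rw [← List.length_reverse (as := rest)]
    exact List.drop_left
  have htake : List.take rest.length cs = rest.reverse := by
    conv_lhs => rw [hsplit]
    rw [← List.length_reverse (as := rest)]
    exact List.take_left
  rw [hA, hB, hlastp1, PySem.List.slice_from_natCast, PySem.List.slice_to_natCast, hdrop, htake]
  simp only [List.length_reverse]
  by_cases hgt : tl.length > 1
  · have hAhead : PySem.List.slice cs none (some (-(tl.length : Int))) = rest.reverse := by
      rw [PySem.List.slice_to_neg_natCast _ _ (by omega)]
      have h3 : cs.length - tl.length = rest.length := by omega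
      rw [h3, htake]
    simp [hgt, hAhead]
  · simp [hgt, reverse_eq_self_of_length_le_one tl (by omega)]

-- ===== VERDICT (by name: the statement is the Claim_ definition above) =====
theorem cutDescriptionBottom_spec : Claim_equal_cutDescriptionBottom := by
  intro string _
  unfold Spec_cutDescriptionBottom cutDescriptionBottom cutDescriptionBottom_alt
  exact cut_main string string.toList
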